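-- pv_equiv track=rewrite | github.com/mladenmj/University-exercises | Machine Learning/lab1/spell.py | edit1
-- ===== SOURCE A (Python) =====
-- def edit1(word):
-- 	n = len(word)
-- 	letters = "abcdefghijklmnopqrstuvwxyz"
-- 	variations = set()
--
-- 	for i in range(n+1):
-- 		for l in letters:
-- 			newword = word[:i] + l + word[i:]
-- 			variations.add(newword)
--
-- 			if i < n:
-- 				newword = word[:i] + l + word[(i+1):]
-- 				variations.add(newword)
--
-- 		if i < n:
-- 			newword = word[:i] + word[(i+1):]
-- 			variations.add(newword)
--
-- 		if i+1 < n: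
-- 			newword = word[:i] + word[i+1] + word[i] + word[(i+1):]
-- 			variations.add(newword)
--
-- 	return variations
-- ===== SOURCE B (Python) =====
-- def _stream(prefix, word):
--     # every edit-1 candidate of prefix+word whose edit lies inside word:
--     # the edits touching word's position 0 first, then recursion on the tail
--     letters = "abcdefghijklmnopqrstuvwxyz"
--     if not word:
--         return [prefix + l for l in letters]
--     rest = word[1:]
--     out = [prefix + l + t for l in letters for t in (word, rest)]
--     out.append(prefix + rest)
--     if rest:
--         out.append(prefix + rest[0] + word)
--     out += _stream(prefix + word[0], rest)
--     return out
--
-- def edit1(word):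
--     return set(_stream("", word))
-- ===== Notes on version B (the rewrite author's own statement) =====
-- stated objective: alternative
-- what changed: Replaces A's double index loop over range(n+1) with interleaved guarded set.add calls by structural recursion on the word: a helper emits the candidates whose edit touches the current position (carrying the already-consumed prefix down as an accumulator) followed by the recursion on the tail, and the set is built once at the top.
import Mathlib
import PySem

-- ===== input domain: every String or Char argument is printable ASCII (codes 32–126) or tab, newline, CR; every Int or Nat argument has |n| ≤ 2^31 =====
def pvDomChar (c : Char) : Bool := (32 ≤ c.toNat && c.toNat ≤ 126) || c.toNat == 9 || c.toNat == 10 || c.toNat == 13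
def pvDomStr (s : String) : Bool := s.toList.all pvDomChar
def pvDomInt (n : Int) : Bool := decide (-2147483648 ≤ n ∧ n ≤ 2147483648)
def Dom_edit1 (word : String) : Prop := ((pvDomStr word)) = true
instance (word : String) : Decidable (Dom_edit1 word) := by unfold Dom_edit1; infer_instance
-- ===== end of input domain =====

-- B replaces A's double index loop with an accumulating set by structural recursion on the word:
-- a helper emits the candidates whose edit lies inside the current tail (carrying the consumed
-- prefix down as an accumulator) and the set is built once at the top; same cost, different algorithm.

def pvLetters : List Char := "abcdefghijklmnopqrstuvwxyz".toList

-- ===== PORT A =====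
def edit1 (word : String) : List String :=
  let w := word.toList
  let n : Int := (w.length : Int)
  let variations : PySem.Set (List Char) :=
    (PySem.List.pyRange 0 (n + 1) 1).foldl (fun vars i =>
      let vars := pvLetters.foldl (fun vars l =>
        let vars := PySem.Set.add vars
          (PySem.List.slice w none (some i) ++ [l] ++ PySem.List.slice w (some i) none)
        if i < n then
          PySem.Set.add vars
            (PySem.List.slice w none (some i) ++ [l] ++ PySem.List.slice w (some (i + 1)) none)
        else vars) vars
      let vars :=
        if i < n then
          PySem.Set.add vars
            (PySem.List.slice w none (some i) ++ PySem.List.slice w (some (i + 1)) none)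
        else vars
      -- word[i+1] / word[i]: in-range under the guard i+1 < n, so getD with a dummy default is exact
      if i + 1 < n then
        PySem.Set.add vars
          (PySem.List.slice w none (some i) ++
            [PySem.List.pyGetD w (i + 1) ' ', PySem.List.pyGetD w i ' '] ++
            PySem.List.slice w (some (i + 1)) none)
      else vars) PySem.Set.empty
  variations.map String.ofList

-- ===== PORT B =====
-- _stream: every edit-1 candidate of prefix+word whose edit lies inside word
def pvStream : List Char → List Char → List (List Char)
  | prefix_, [] => pvLetters.map (fun l => prefix_ ++ [l])
  | prefix_, h :: rest =>
    let out := pvLetters.flatMap (fun l => [h :: rest, rest].map (fun t => prefix_ ++ [l] ++ t))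
    let out := out ++ [prefix_ ++ rest]
    -- rest[0]: guarded by 'if rest', so headD with a dummy default is exact
    let out := if rest ≠ [] then out ++ [prefix_ ++ [rest.headD ' '] ++ (h :: rest)] else out
    out ++ pvStream (prefix_ ++ [h]) rest

def edit1_alt (word : String) : List String :=
  (PySem.Set.ofList (pvStream [] word.toList)).map String.ofList

-- ===== PRECONDITION & SPEC =====
def Spec_edit1 (word : String) (out : List String) : Prop := out = edit1_alt word
instance (word : String) (out : List String) : Decidable (Spec_edit1 word out) := by unfold Spec_edit1; infer_instance

-- ===== CLAIM (what is proved, stated in full; the proofs are below) =====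
def Claim_equal_edit1 : Prop := ∀ (word : String), Dom_edit1 word → Spec_edit1 word (edit1 word)

-- ===== LEMMAS AND PROOFS =====

def blockA (w : List Char) (n i : Int) : List (List Char) :=
  (pvLetters.flatMap (fun l =>
    (PySem.List.slice w none (some i) ++ [l] ++ PySem.List.slice w (some i) none) ::
    (if i < n then [PySem.List.slice w none (some i) ++ [l] ++ PySem.List.slice w (some (i + 1)) none] else [])))
  ++ (if i < n then [PySem.List.slice w none (some i) ++ PySem.List.slice w (some (i + 1)) none] else [])
  ++ (if i + 1 < n then [PySem.List.slice w none (some i) ++ [PySem.List.pyGetD w (i + 1) ' ', PySem.List.pyGetD w i ' '] ++ PySem.List.slice w (some (i + 1)) none] else [])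

def streamA (w : List Char) : List (List Char) :=
  (PySem.List.pyRange 0 ((w.length : Int) + 1) 1).flatMap (blockA w (w.length : Int))



theorem A_shape (word : String) :
    edit1 word = (PySem.Set.ofList (streamA word.toList)).map String.ofList := by
  unfold streamA
  show ((PySem.List.pyRange 0 ((word.toList.length : Int) + 1) 1).foldl (fun vars i =>
      let vars := pvLetters.foldl (fun vars l =>
        let vars := PySem.Set.add vars
          (PySem.List.slice word.toList none (some i) ++ [l] ++ PySem.List.slice word.toList (some i) none)
        if i < (word.toList.length : Int) then
          PySem.Set.add vars
            (PySem.List.slice word.toList none (some i) ++ [l] ++ PySem.List.slice word.toList (some (i + 1)) none)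
        else vars) vars
      let vars :=
        if i < (word.toList.length : Int) then
          PySem.Set.add vars
            (PySem.List.slice word.toList none (some i) ++ PySem.List.slice word.toList (some (i + 1)) none)
        else vars
      if i + 1 < (word.toList.length : Int) then
        PySem.Set.add vars
          (PySem.List.slice word.toList none (some i) ++
            [PySem.List.pyGetD word.toList (i + 1) ' ', PySem.List.pyGetD word.toList i ' '] ++
            PySem.List.slice word.toList (some (i + 1)) none)
      else vars) ([] : PySem.Set (List Char))).map String.ofList = _
  rw [PySem.Set.ofList_eq_foldl, List.foldl_flatMap]
  congr 1
  apply PySem.List.foldl_congr_mem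
  intro vars i _
  show _ = (blockA _ _ i).foldl PySem.Set.add vars
  unfold blockA
  rw [List.foldl_append, List.foldl_append, List.foldl_flatMap]
  by_cases h1 : i < (word.toList.length : Int) <;>
    by_cases h2 : i + 1 < (word.toList.length : Int) <;>
      simp only [String.length_toList] at h1 h2 <;>
        simp [h1, h2]

theorem flatMap_cons_ite {α β : Type} (c : Prop) [Decidable c] (f g : α → List β) (xs : List α) :
    xs.flatMap (fun l => f l :: (if c then [g l] else [])) =
      if c then xs.flatMap (fun l => [f l, g l]) else xs.map (fun l => f l) := by
  split_ifs with hc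
  · simp
  · induction xs with
    | nil => rfl
    | cons a t ih => simp only [List.flatMap_cons] at ih ⊢; rw [ih]; rfl

theorem block0 (h : Char) (rest : List Char) :
    blockA (h :: rest) ((rest.length : Int) + 1) 0 =
      (if rest ≠ [] then
        (pvLetters.flatMap (fun l => [h :: rest, rest].map (fun t => l :: t)) ++ [rest]) ++
          [rest.headD ' ' :: h :: rest]
      else pvLetters.flatMap (fun l => [h :: rest, rest].map (fun t => l :: t)) ++ [rest]) := by
  unfold blockA
  have s0 : PySem.List.slice (h :: rest) none (some 0) = [] := by
    rw [show (0:Int) = ((0:Nat):Int) from rfl, PySem.List.slice_to_natCast]; rfl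
  have s0' : PySem.List.slice (h :: rest) (some 0) none = h :: rest := by
    rw [show (0:Int) = ((0:Nat):Int) from rfl, PySem.List.slice_from_natCast]; rfl
  have s1 : PySem.List.slice (h :: rest) (some (0 + 1)) none = rest := by
    rw [show ((0:Int) + 1) = ((1:Nat):Int) from rfl, PySem.List.slice_from_natCast]; rfl
  have g0 : PySem.List.pyGetD (h :: rest) 0 ' ' = h := by
    rw [show (0:Int) = ((0:Nat):Int) from rfl, PySem.List.pyGetD_natCast]; rfl
  have g1 : PySem.List.pyGetD (h :: rest) (0 + 1) ' ' = rest.headD ' ' := by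
    rw [show ((0:Int) + 1) = ((1:Nat):Int) from rfl, PySem.List.pyGetD_natCast]
    cases rest <;> rfl
  have h0 : (0 : Int) < (rest.length : Int) + 1 := by positivity
  rw [s0, s0', s1, g0, g1, flatMap_cons_ite, if_pos h0]
  cases rest with
  | nil => simp
  | cons r0 rs =>
    have h1 : (0 : Int) + 1 < ((r0 :: rs).length : Int) + 1 := by
      simp only [List.length_cons]
      omega
    rw [if_pos h1, if_pos (by simp : (r0 :: rs) ≠ [])]
    simp [show (0:Int) ≤ (rs.length : Int) + 1 by positivity]

theorem blockA_shift (h : Char) (rest : List Char) (k : Nat) :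
    blockA (h :: rest) ((rest.length : Int) + 1) (1 + (k : Int)) =
      (blockA rest (rest.length : Int) (0 + (k : Int))).map (fun e => h :: e) := by
  unfold blockA
  have e2 : (1 + (k : Int) + 1) = ((k + 2 : Nat) : Int) := by push_cast; ring
  have e1 : (1 + (k : Int)) = ((k + 1 : Nat) : Int) := by push_cast; ring
  have e4 : (0 + (k : Int) + 1) = ((k + 1 : Nat) : Int) := by push_cast; ring
  have e3 : (0 + (k : Int)) = ((k : Nat) : Int) := by omega
  rw [e2, e1, e4, e3]
  simp only [PySem.List.slice_to_natCast, PySem.List.slice_from_natCast, PySem.List.pyGetD_natCast]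
  have g1 : (((k + 1 : Nat) : Int) < (rest.length : Int) + 1) ↔ (((k : Nat) : Int) < (rest.length : Int)) := by
    push_cast; omega
  have g2 : (((k + 2 : Nat) : Int) < (rest.length : Int) + 1) ↔ (((k + 1 : Nat) : Int) < (rest.length : Int)) := by
    push_cast; omega
  have t1 : (h :: rest).take (k + 1) = h :: rest.take k := rfl
  have d1 : (h :: rest).drop (k + 1) = rest.drop k := rfl
  have d2 : (h :: rest).drop (k + 2) = rest.drop (k + 1) := rfl
  have gd1 : (h :: rest).getD (k + 1) ' ' = rest.getD k ' ' := rfl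
  have gd2 : (h :: rest).getD (k + 2) ' ' = rest.getD (k + 1) ' ' := rfl
  rw [t1, d1, d2, gd1, gd2, flatMap_cons_ite, flatMap_cons_ite]
  have G1 : ((((k + 1 : Nat)) : Int) < (rest.length : Int) + 1) ↔ k < rest.length := by
    push_cast; omega
  have G2 : ((((k + 2 : Nat)) : Int) < (rest.length : Int) + 1) ↔ k + 1 < rest.length := by
    push_cast; omega
  have G3 : ((((k : Nat)) : Int) < (rest.length : Int)) ↔ k < rest.length := by
    omega
  have G4 : ((((k + 1 : Nat)) : Int) < (rest.length : Int)) ↔ k + 1 < rest.length := by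
    push_cast; omega
  simp only [G1, G2, G3, G4]
  by_cases c1 : k < rest.length <;> by_cases c2 : k + 1 < rest.length <;>
    simp [c1, c2, Function.comp_def, List.map_append, List.map_flatMap]

theorem stream_cons (h : Char) (rest : List Char) :
    streamA (h :: rest) =
      blockA (h :: rest) ((rest.length : Int) + 1) 0 ++ (streamA rest).map (fun e => h :: e) := by
  unfold streamA
  simp only [List.length_cons]
  have hc : ((rest.length + 1 : Nat) : Int) = (rest.length : Int) + 1 := by push_cast; ring
  rw [hc, PySem.List.pyRange_one_cons (by positivity), List.flatMap_cons]
  congr 1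
  rw [PySem.List.pyRange_one, PySem.List.pyRange_one]
  have hn1 : ((rest.length : Int) + 1 + 1 - (0 + 1)).toNat = rest.length + 1 := by omega
  have hn2 : ((rest.length : Int) + 1 - 0).toNat = rest.length + 1 := by omega
  rw [hn1, hn2, List.flatMap_map, List.flatMap_map, List.map_flatMap]
  apply List.flatMap_congr
  intro k _
  rw [show ((0:Int) + 1 + (k : Int)) = 1 + (k : Int) by ring]
  exact blockA_shift h rest k

theorem stream_nil : streamA [] = pvLetters.map (fun l => [l]) := by decide

theorem pvStream_eq (pre : List Char) (w : List Char) :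
    pvStream pre w = (streamA w).map (fun e => pre ++ e) := by
  induction w generalizing pre with
  | nil => rw [stream_nil]; simp [pvStream, List.map_map, Function.comp_def]
  | cons h rest ih =>
    show ((if rest ≠ [] then
            (pvLetters.flatMap (fun l => [h :: rest, rest].map (fun t => pre ++ [l] ++ t)) ++
                [pre ++ rest]) ++
              [pre ++ [rest.headD ' '] ++ (h :: rest)]
          else
            pvLetters.flatMap (fun l => [h :: rest, rest].map (fun t => pre ++ [l] ++ t)) ++
              [pre ++ rest]) ++
          pvStream (pre ++ [h]) rest) = _
    rw [stream_cons, block0, ih (pre ++ [h])]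
    by_cases hr : rest ≠ [] <;>
      simp [hr, List.map_append, List.map_map, List.map_flatMap, Function.comp_def,
        List.append_assoc]

-- ===== VERDICT (by name: the statement is the Claim_ definition above) =====
theorem edit1_spec : Claim_equal_edit1 := by
  intro word _
  unfold Spec_edit1
  rw [A_shape, edit1_alt, pvStream_eq]
  simp
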